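-- pv_equiv track=rewrite | github.com/ranglier/umamusume_roster_manager | scripts/serve_reference.py | dedupe_legacy_factors
-- ===== SOURCE A (Python) =====
-- def dedupe_legacy_factors(factors: list[dict]) -> list[dict]:
--     deduped: dict[tuple[str, str], dict] = {}
--     for factor in factors:
--         factor_key = (str(factor.get("kind") or ""), str(factor.get("target_key") or ""))
--         current = deduped.get(factor_key)
--         if current is None or int(factor.get("stars") or 0) > int(current.get("stars") or 0):
--             deduped[factor_key] = factor
--     return sorted(
--         deduped.values(),
--         key=lambda factor: (
--             str(factor.get("kind") or ""),
--             str(factor.get("target_label") or factor.get("target_key") or ""),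
--         ),
--     )
-- ===== SOURCE B (Python) =====
-- def dedupe_legacy_factors(factors: list[dict]) -> list[dict]:
--     # Group factors per dedup key (first-occurrence order), then reduce each
--     # group to its first maximal-stars member; finally sort by the output key.
--     groups: dict[tuple[str, str], list[dict]] = {}
--     for f in factors:
--         k = (str(f.get("kind") or ""), str(f.get("target_key") or ""))
--         groups.setdefault(k, []).append(f)
--     winners = []
--     for g in groups.values():
--         w = g[0]
--         for f in g[1:]:
--             if int(f.get("stars") or 0) > int(w.get("stars") or 0):
--                 w = f
--         winners.append(w)
--     return sorted(
--         winners,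
--         key=lambda f: (
--             str(f.get("kind") or ""),
--             str(f.get("target_label") or f.get("target_key") or ""),
--         ),
--     )
-- ===== Notes on version B (the rewrite author's own statement) =====
-- stated objective: alternative
-- what changed: Replaces A's single-pass dict of running best factors by a group-then-reduce decomposition: one pass buckets the factors per dedup key with setdefault/append, then each group is reduced to its first maximal-stars member, and the winners are sorted by the output key; stars are still parsed only inside multi-element groups, so B raises exactly where A does.
import Mathlib
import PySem

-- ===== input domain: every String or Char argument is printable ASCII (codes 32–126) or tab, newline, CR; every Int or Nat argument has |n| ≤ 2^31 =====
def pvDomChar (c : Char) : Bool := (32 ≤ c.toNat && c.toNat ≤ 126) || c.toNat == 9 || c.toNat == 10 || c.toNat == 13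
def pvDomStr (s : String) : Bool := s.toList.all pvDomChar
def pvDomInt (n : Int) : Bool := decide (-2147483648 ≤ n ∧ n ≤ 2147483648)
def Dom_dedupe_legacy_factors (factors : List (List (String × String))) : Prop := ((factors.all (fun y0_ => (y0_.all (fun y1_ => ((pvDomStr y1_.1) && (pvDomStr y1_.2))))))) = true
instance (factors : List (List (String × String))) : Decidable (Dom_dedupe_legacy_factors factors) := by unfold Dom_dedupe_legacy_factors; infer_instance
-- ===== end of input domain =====

-- B replaces A's single-pass best-factor dict by group-per-key-then-reduce (alternative
-- structure, same cost); equivalence is about the return value (neither mutates its argument).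

-- ===== PORT A =====
-- str(f.get(k) or "") : values are strings, so this is exactly the first-match lookup with "" for missing ('' stays '')
def pvGetStrA (f : List (String × String)) (k : String) : String :=
  (List.lookup k f).getD ""

-- int(f.get("stars") or 0) : missing/empty -> 0; int(s) = PySem.Int.ofStr? s, whose none (ValueError) is excluded by Pre_
def pvStarsA (f : List (String × String)) : Int :=
  match List.lookup "stars" f with
  | none => 0
  | some s => if s = "" then 0 else (PySem.Int.ofStr? s).getD 0

-- str(f.get("target_label") or f.get("target_key") or "")
def pvLabelA (f : List (String × String)) : String :=
  let lab := pvGetStrA f "target_label"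
  if lab = "" then pvGetStrA f "target_key" else lab

def dedupe_legacy_factors (factors : List (List (String × String))) : List (List (String × String)) :=
  let deduped : PySem.Dict (String × String) (List (String × String)) :=
    factors.foldl (fun d factor =>
      let fk := (pvGetStrA factor "kind", pvGetStrA factor "target_key")
      match d.get? fk with
      | none => d.insert fk factor
      | some current =>
        if pvStarsA factor > pvStarsA current then d.insert fk factor else d)
      PySem.Dict.empty
  PySem.List.sorted2 deduped.values (fun f => pvGetStrA f "kind") pvLabelA

-- ===== PORT B =====
def pvGetStrB (f : List (String × String)) (k : String) : String :=
  (List.lookup k f).getD ""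

def pvStarsB (f : List (String × String)) : Int :=
  match List.lookup "stars" f with
  | none => 0
  | some s => if s = "" then 0 else (PySem.Int.ofStr? s).getD 0

def pvLabelB (f : List (String × String)) : String :=
  let lab := pvGetStrB f "target_label"
  if lab = "" then pvGetStrB f "target_key" else lab

def pvKeyB (f : List (String × String)) : String × String :=
  (pvGetStrB f "kind", pvGetStrB f "target_key")

-- w = g[0]; for f in g[1:]: if stars(f) > stars(w): w = f   (g is never empty; [] is a totalising dummy)
def pvGroupWinner (g : List (List (String × String))) : List (String × String) :=
  match g with
  | [] => []
  | h :: t => t.foldl (fun w f => if pvStarsB f > pvStarsB w then f else w) h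

def dedupe_legacy_factors_alt (factors : List (List (String × String))) : List (List (String × String)) :=
  -- groups.setdefault(k, []).append(f)
  let groups : PySem.Dict (String × String) (List (List (String × String))) :=
    factors.foldl (fun g f => g.insert (pvKeyB f) (g.getD (pvKeyB f) [] ++ [f])) PySem.Dict.empty
  -- winners.append(winner of g) for each group, in group order
  let winners := groups.values.map pvGroupWinner
  PySem.List.sorted2 winners (fun f => pvGetStrB f "kind") pvLabelB

-- ===== PRECONDITION & SPEC =====
-- Pre_ is exactly where Python A returns: A parses int(stars) only when a dedup key collides, so it
-- raises ValueError precisely when some factor whose key occurs more than once carries a present,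
-- non-empty, unparsable "stars" string (and B, which parses stars under the same collisions, raises
-- there too); those inputs are excluded.
def Pre_dedupe_legacy_factors (factors : List (List (String × String))) : Prop :=
  (factors.all (fun f =>
    (factors.countP (fun g =>
        (pvGetStrA g "kind", pvGetStrA g "target_key")
          == (pvGetStrA f "kind", pvGetStrA f "target_key")) ≤ 1) ||
    (match List.lookup "stars" f with
     | none => true
     | some s => s == "" || (PySem.Int.ofStr? s).isSome))) = true
instance (factors : List (List (String × String))) : Decidable (Pre_dedupe_legacy_factors factors) := by
  unfold Pre_dedupe_legacy_factors; infer_instance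

def pvWitness_dedupe_legacy_factors : (List (List (String × String))) :=
  [[("kind", "skill"), ("target_key", "a"), ("stars", "2")],
   [("kind", "skill"), ("target_key", "a"), ("stars", "3")],
   [("kind", "race"), ("target_key", "b"), ("target_label", "B")]]

def Spec_dedupe_legacy_factors (factors : List (List (String × String))) (out : List (List (String × String))) : Prop := out = dedupe_legacy_factors_alt factors
instance (factors : List (List (String × String))) (out : List (List (String × String))) : Decidable (Spec_dedupe_legacy_factors factors out) := by unfold Spec_dedupe_legacy_factors; infer_instance

-- ===== CLAIM (what is proved, stated in full; the proofs are below) =====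
def Claim_equal_dedupe_legacy_factors : Prop := ∀ (factors : List (List (String × String))), Dom_dedupe_legacy_factors factors → Pre_dedupe_legacy_factors factors → Spec_dedupe_legacy_factors factors (dedupe_legacy_factors factors)

-- ===== LEMMAS AND PROOFS =====

-- the dedup key (str(f.get("kind") or ""), str(f.get("target_key") or ""))
def pvKeyF (f : List (String × String)) : String × String :=
  (pvGetStrA f "kind", pvGetStrA f "target_key")

-- the body of A's accumulation loop
def pvStepA (d : PySem.Dict (String × String) (List (String × String)))
    (factor : List (String × String)) : PySem.Dict (String × String) (List (String × String)) :=
  match d.get? (pvKeyF factor) with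
  | none => d.insert (pvKeyF factor) factor
  | some current =>
    if pvStarsA factor > pvStarsA current then d.insert (pvKeyF factor) factor else d

-- the body of B's grouping loop
def pvStepG (g : PySem.Dict (String × String) (List (List (String × String))))
    (f : List (String × String)) : PySem.Dict (String × String) (List (List (String × String))) :=
  g.insert (pvKeyF f) (g.getD (pvKeyF f) [] ++ [f])

lemma pv_portA_eq (factors : List (List (String × String))) :
    dedupe_legacy_factors factors =
      PySem.List.sorted2 ((factors.foldl pvStepA PySem.Dict.empty).values)
        (fun f => pvGetStrA f "kind") pvLabelA := rfl

lemma pv_portB_eq (factors : List (List (String × String))) :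
    dedupe_legacy_factors_alt factors =
      PySem.List.sorted2 (((factors.foldl pvStepG PySem.Dict.empty).values).map pvGroupWinner)
        (fun f => pvGetStrA f "kind") pvLabelA := rfl

-- appending one factor to a nonempty group updates its winner exactly as A's comparison does
lemma pv_winner_append (l : List (List (String × String))) (hl : l ≠ [])
    (x : List (String × String)) :
    pvGroupWinner (l ++ [x]) =
      if pvStarsA x > pvStarsA (pvGroupWinner l) then x else pvGroupWinner l := by
  cases l with
  | nil => exact absurd rfl hl
  | cons h t =>
    simp only [pvGroupWinner, List.cons_append, List.foldl_append, List.foldl_cons, List.foldl_nil]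
    rfl

-- the central invariant: A's accumulator holds exactly the winner of B's group, key by key
lemma pv_inv (l : List (List (String × String)))
    (d : PySem.Dict (String × String) (List (String × String)))
    (g : PySem.Dict (String × String) (List (List (String × String))))
    (hpt : ∀ k, d.get? k = (g.get? k).map pvGroupWinner)
    (hne : ∀ k gl, g.get? k = some gl → gl ≠ []) :
    ∀ k, (l.foldl pvStepA d).get? k = ((l.foldl pvStepG g).get? k).map pvGroupWinner := by
  induction l generalizing d g with
  | nil => intro k; exact hpt k
  | cons x t ih =>
    simp only [List.foldl_cons]
    refine ih (pvStepA d x) (pvStepG g x) ?_ ?_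
    · intro k
      by_cases hk : k = pvKeyF x
      · subst hk
        cases hgx : g.get? (pvKeyF x) with
        | none =>
          have hdx : d.get? (pvKeyF x) = none := by rw [hpt, hgx]; rfl
          have hgD : g.getD (pvKeyF x) [] = [] := by
            rw [PySem.Dict.getD_eq_get?_getD, hgx]; rfl
          simp only [pvStepA, pvStepG, hdx, hgD]
          rw [PySem.Dict.get?_insert_self, PySem.Dict.get?_insert_self]
          rfl
        | some gl =>
          have hdx : d.get? (pvKeyF x) = some (pvGroupWinner gl) := by rw [hpt, hgx]; rfl
          have hgD : g.getD (pvKeyF x) [] = gl := by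
            rw [PySem.Dict.getD_eq_get?_getD, hgx]; rfl
          have hwin := pv_winner_append gl (hne _ _ hgx) x
          simp only [pvStepA, pvStepG, hdx, hgD]
          rw [PySem.Dict.get?_insert_self, Option.map_some, hwin]
          by_cases hgt : pvStarsA x > pvStarsA (pvGroupWinner gl)
          · rw [if_pos hgt, if_pos hgt, PySem.Dict.get?_insert_self]
          · rw [if_neg hgt, if_neg hgt, hdx]
      · cases hgx : g.get? (pvKeyF x) with
        | none =>
          have hdx : d.get? (pvKeyF x) = none := by rw [hpt, hgx]; rfl
          simp only [pvStepA, pvStepG, hdx]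
          rw [PySem.Dict.get?_insert, if_neg hk, PySem.Dict.get?_insert, if_neg hk]
          exact hpt k
        | some gl =>
          have hdx : d.get? (pvKeyF x) = some (pvGroupWinner gl) := by rw [hpt, hgx]; rfl
          simp only [pvStepA, pvStepG, hdx]
          rw [PySem.Dict.get?_insert, if_neg hk]
          by_cases hgt : pvStarsA x > pvStarsA (pvGroupWinner gl)
          · rw [if_pos hgt, PySem.Dict.get?_insert, if_neg hk]
            exact hpt k
          · rw [if_neg hgt]
            exact hpt k
    · intro k gl hgl
      simp only [pvStepG] at hgl
      rw [PySem.Dict.get?_insert] at hgl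
      by_cases hk : k = pvKeyF x
      · rw [if_pos hk] at hgl
        cases hgl
        simp
      · rw [if_neg hk] at hgl
        exact hne k gl hgl

-- both loops create keys in first-occurrence order, so the key lists coincide
lemma pv_keys_eq (factors : List (List (String × String))) :
    (factors.foldl pvStepA PySem.Dict.empty).keys
      = (factors.foldl pvStepG PySem.Dict.empty).keys := by
  have hG : (factors.foldl pvStepG PySem.Dict.empty).keys
      = PySem.Set.update (PySem.Dict.empty : PySem.Dict (String × String) (List (List (String × String)))).keys (factors.map pvKeyF) :=
    PySem.Dict.keys_foldl_insert_key factors pvKeyF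
      (fun g f => g.getD (pvKeyF f) [] ++ [f]) _
  have hA : ∀ (l : List (List (String × String)))
      (a : PySem.Dict (String × String) (List (String × String))),
      (l.foldl pvStepA a).keys = PySem.Set.update a.keys (l.map pvKeyF) := by
    intro l
    induction l with
    | nil => intro a; rfl
    | cons x t ihl =>
      intro a
      rw [List.foldl_cons, List.map_cons]
      have hstep : (pvStepA a x).keys = PySem.Set.add a.keys (pvKeyF x) := by
        cases h : a.get? (pvKeyF x) with
        | none =>
          have hcont : a.contains (pvKeyF x) = false := by
            rw [PySem.Dict.contains_eq_isSome_get?, h]; rfl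
          have hmem : pvKeyF x ∉ a.keys := by
            have := PySem.Dict.contains_iff_mem_keys (d := a) (k := pvKeyF x)
            intro hm
            rw [hcont] at this
            exact absurd (this.2 hm) (by simp)
          simp only [pvStepA, h]
          rw [PySem.Dict.keys_insert_of_not_contains _ _ hcont]
          simp [PySem.Set.add, hmem]
        | some cur =>
          have hcont : a.contains (pvKeyF x) = true := by
            rw [PySem.Dict.contains_eq_isSome_get?, h]; rfl
          have hmem : pvKeyF x ∈ a.keys :=
            (PySem.Dict.contains_iff_mem_keys (d := a) (k := pvKeyF x)).1 hcont
          simp only [pvStepA, h]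
          by_cases hgt : pvStarsA x > pvStarsA cur
          · rw [if_pos hgt, PySem.Dict.keys_insert_of_contains _ _ hcont]
            simp [PySem.Set.add, hmem]
          · rw [if_neg hgt]
            simp [PySem.Set.add, hmem]
      rw [ihl (pvStepA a x), hstep]
      rfl
  rw [hA, hG]
  rfl

-- ===== VERDICT (by name: the statement is the Claim_ definition above) =====
theorem dedupe_legacy_factors_spec : Claim_equal_dedupe_legacy_factors := by
  intro factors _ _
  unfold Spec_dedupe_legacy_factors
  rw [pv_portA_eq, pv_portB_eq]
  congr 1
  set afinal := factors.foldl pvStepA PySem.Dict.empty with hafinal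
  set groups := factors.foldl pvStepG PySem.Dict.empty with hgroups
  have hkeys : afinal.keys = groups.keys := pv_keys_eq factors
  have hnodupG : groups.keys.Nodup :=
    PySem.Dict.nodup_keys_foldl_insert_key factors pvKeyF
      (fun g f => g.getD (pvKeyF f) [] ++ [f]) _ (by simp [PySem.Dict.keys_empty])
  have hnodupA : afinal.keys.Nodup := hkeys ▸ hnodupG
  have hget : ∀ k, afinal.get? k = (groups.get? k).map pvGroupWinner := by
    refine pv_inv factors PySem.Dict.empty PySem.Dict.empty ?_ ?_
    · intro k; rw [PySem.Dict.get?_empty, PySem.Dict.get?_empty]; rfl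
    · intro k gl h; rw [PySem.Dict.get?_empty] at h; cases h
  calc afinal.values
      = afinal.keys.map (fun k => afinal.getD k []) :=
        PySem.Dict.values_eq_map_keys afinal hnodupA []
    _ = groups.keys.map (fun k => pvGroupWinner (groups.getD k [])) := by
        rw [hkeys]
        refine List.map_congr_left ?_
        intro k _
        rw [PySem.Dict.getD_eq_get?_getD, PySem.Dict.getD_eq_get?_getD, hget k]
        cases groups.get? k with
        | none => rfl
        | some gl => rfl
    _ = (groups.values).map pvGroupWinner := by
        rw [PySem.Dict.values_eq_map_keys groups hnodupG [], List.map_map]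
        rfl
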